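-- pv_equiv track=rewrite | github.com/dcribb19/bitesofpy | code_challenges/287/sum_indices.py | sum_indices
-- ===== SOURCE A (Python) =====
-- from collections import defaultdict
-- from itertools import accumulate
-- from typing import List
--
-- def sum_indices(items: List[str]) -> int:
--     ...
--     indices = 0
--     d = defaultdict(list)
--     for x in range(len(items)):
--         d[items[x]].append(x)
--
--     for value in d.values():
--         indices += sum(accumulate(value))
--
--     return indices
-- ===== SOURCE B (Python) =====
-- from collections import defaultdict
-- from typing import List
--
-- def sum_indices(items: List[str]) -> int:
--     total = 0
--     run = defaultdict(int)
--     for x, item in enumerate(items):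
--         run[item] += x
--         total += run[item]
--     return total
-- ===== Notes on version B (the rewrite author's own statement) =====
-- stated objective: simpler
-- what changed: Fuses the two phases (build dict of index lists, then sum prefix-sums per key) into one forward pass that keeps only a per-item running sum of indices and a total, exploiting sum(accumulate(v)) = sum of running sums at each occurrence; no index lists and no accumulate step are built.
import Mathlib
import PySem

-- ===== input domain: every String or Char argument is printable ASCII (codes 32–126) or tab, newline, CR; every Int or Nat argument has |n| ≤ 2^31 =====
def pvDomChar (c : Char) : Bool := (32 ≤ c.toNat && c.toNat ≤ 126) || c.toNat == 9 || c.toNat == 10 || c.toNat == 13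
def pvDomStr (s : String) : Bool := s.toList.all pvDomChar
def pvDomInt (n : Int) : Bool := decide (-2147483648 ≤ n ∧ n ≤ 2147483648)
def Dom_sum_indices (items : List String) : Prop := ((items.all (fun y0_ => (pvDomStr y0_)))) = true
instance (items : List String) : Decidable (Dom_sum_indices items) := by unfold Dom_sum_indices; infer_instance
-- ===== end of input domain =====

-- B fuses A's two phases (group indices per item, then sum prefix sums) into one pass
-- keeping a per-item running index sum; equal return value on all inputs (simpler, no speed claim).

-- ===== PORT A =====
-- itertools.accumulate on a list of ints (running prefix sums)
def pyAccumulateGo (s : Int) : List Int → List Int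
  | [] => []
  | y :: ys => (s + y) :: pyAccumulateGo (s + y) ys

def pyAccumulate (v : List Int) : List Int := pyAccumulateGo 0 v

def sum_indices (items : List String) : Int :=
  let d := (PySem.List.pyRange 0 (items.length : Int) 1).foldl
    (fun d x => d.modify (PySem.List.pyGetD items x "") [] (fun v => v ++ [x]))
    PySem.Dict.empty
  d.values.foldl (fun indices v => indices + (pyAccumulate v).sum) 0

-- ===== PORT B =====
def sum_indices_alt (items : List String) : Int :=
  ((PySem.List.enumerate items 0).foldl
    (fun st p =>
      let r := st.1.getD p.2 0 + p.1
      (st.1.insert p.2 r, st.2 + r))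
    (PySem.Dict.empty, 0)).2

-- ===== PRECONDITION & SPEC =====
def Spec_sum_indices (items : List String) (out : Int) : Prop := out = sum_indices_alt items
instance (items : List String) (out : Int) : Decidable (Spec_sum_indices items out) := by unfold Spec_sum_indices; infer_instance

-- ===== CLAIM (what is proved, stated in full; the proofs are below) =====
def Claim_equal_sum_indices : Prop := ∀ (items : List String), Dom_sum_indices items → Spec_sum_indices items (sum_indices items)

-- ===== LEMMAS AND PROOFS =====

-- A's grouping dict (first loop of port A)
def pvDA (items : List String) : PySem.Dict String (List Int) :=
  (PySem.List.pyRange 0 (items.length : Int) 1).foldl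
    (fun d x => d.modify (PySem.List.pyGetD items x "") [] (fun v => v ++ [x]))
    PySem.Dict.empty

-- the indices at which k occurs, as enumerate pairs filtered
def pvIdx (items : List String) (k : String) : List Int :=
  ((PySem.List.enumerate items 0).filter (fun p => p.2 == k)).map (fun p => p.1)

theorem pvAccGo_append (x : Int) : ∀ (v : List Int) (s : Int),
    (pyAccumulateGo s (v ++ [x])).sum = (pyAccumulateGo s v).sum + (s + v.sum + x) := by
  intro v
  induction v with
  | nil => intro s; simp [pyAccumulateGo]
  | cons y ys ih => intro s; simp [pyAccumulateGo, ih (s + y)]; ring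

theorem pvAcc_append (v : List Int) (x : Int) :
    (pyAccumulate (v ++ [x])).sum = (pyAccumulate v).sum + (v.sum + x) := by
  simpa using pvAccGo_append x v 0

theorem pvEnumerate_append (y : String) : ∀ (xs : List String) (s : Int),
    PySem.List.enumerate (xs ++ [y]) s = PySem.List.enumerate xs s ++ [(s + xs.length, y)] := by
  intro xs
  induction xs with
  | nil => intro s; simp [PySem.List.enumerate_cons, PySem.List.enumerate_nil]
  | cons z zs ih =>
      intro s
      simp [PySem.List.enumerate_cons, ih (s + 1)]
      ring

theorem pvIdx_append (items : List String) (y k : String) :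
    pvIdx (items ++ [y]) k
      = pvIdx items k ++ (if y = k then [(items.length : Int)] else []) := by
  unfold pvIdx
  rw [pvEnumerate_append y items 0]
  by_cases h : y = k <;> simp [List.filter_append, h]

theorem pvDA_append (items : List String) (y : String) :
    pvDA (items ++ [y])
      = (pvDA items).modify y [] (fun v => v ++ [(items.length : Int)]) := by
  unfold pvDA
  have hlen : (((items ++ [y]).length : Nat) : Int) = (items.length : Int) + 1 := by
    simp
  rw [hlen, PySem.List.pyRange_one_succ_right (by positivity), List.foldl_append]
  have hbody :
      (PySem.List.pyRange 0 (items.length : Int) 1).foldl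
        (fun d x => d.modify (PySem.List.pyGetD (items ++ [y]) x "") [] (fun v => v ++ [x]))
        PySem.Dict.empty
      = (PySem.List.pyRange 0 (items.length : Int) 1).foldl
        (fun d x => d.modify (PySem.List.pyGetD items x "") [] (fun v => v ++ [x]))
        PySem.Dict.empty := by
    apply PySem.List.foldl_congr_mem
    intro acc x hx
    rw [PySem.List.mem_pyRange_one] at hx
    rw [PySem.List.pyGetD_eq_getElem (items ++ [y]) "" hx.1 (by simp; omega),
        PySem.List.pyGetD_eq_getElem items "" hx.1 (by omega),
        List.getElem_append_left]
  rw [hbody]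
  simp only [List.foldl_cons, List.foldl_nil]
  rw [PySem.List.pyGetD_eq_getElem (items ++ [y]) "" (by positivity) (by simp)]
  simp

theorem pvDA_getD (items : List String) : ∀ (k : String),
    (pvDA items).getD k [] = pvIdx items k := by
  induction items using List.reverseRecOn with
  | nil => intro k; simp [pvDA, pvIdx, PySem.List.enumerate_nil]
  | append_singleton xs y ih =>
      intro k
      rw [pvDA_append, pvIdx_append, PySem.Dict.modify,
          PySem.Dict.getD_insert, ih k, ih y]
      by_cases h : k = y
      · subst h; simp
      · have h2 : ¬ y = k := fun hyk => h hyk.symm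
        simp [h, h2]

theorem pvDA_nodup (items : List String) : (pvDA items).keys.Nodup := by
  unfold pvDA
  exact PySem.Dict.nodup_keys_foldl_modify_key _
    (fun x => PySem.List.pyGetD items x "") [] (fun _ x => fun v => v ++ [x]) _
    (by simp [PySem.Dict.keys_empty])

-- the value of A's second loop on any dict
theorem pvResult_eq (d : PySem.Dict String (List Int)) :
    d.values.foldl (fun indices v => indices + (pyAccumulate v).sum) 0
      = (d.items.map (fun p => (pyAccumulate p.2).sum)).sum := by
  rw [PySem.List.foldl_add]
  simp [PySem.Dict.values, List.map_map, Function.comp_def]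

-- replacing the (unique) entry at key k changes the mapped sum by the delta at k
theorem pvSum_map_replace (k : String) (w : List Int) (x : Int) :
    ∀ (l : List (String × List Int)), (l.map (fun p => p.1)).Nodup → (k, w) ∈ l →
    ((l.map (fun p => if p.1 == k then (k, w ++ [x]) else p)).map
        (fun p => (pyAccumulate p.2).sum)).sum
      = ((l.map (fun p => (pyAccumulate p.2).sum)).sum
          + ((pyAccumulate (w ++ [x])).sum - (pyAccumulate w).sum)) := by
  intro l
  induction l with
  | nil => simp
  | cons p t ih =>
      intro hnd hmem
      simp only [List.map_cons, List.nodup_cons] at hnd ⊢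
      rcases List.mem_cons.1 hmem with hp | ht
      · subst hp
        simp only [beq_self_eq_true, if_true]
        have ht' : ∀ q ∈ t, (q.1 == k) = false := by
          intro q hq
          by_contra hbe
          have hqk : q.1 = k := by
            cases hb : (q.1 == k) with
            | false => exact absurd hb hbe
            | true => exact eq_of_beq hb
          exact hnd.1 (List.mem_map.2 ⟨q, hq, hqk⟩)
        have hmapt : t.map (fun p => if p.1 == k then (k, w ++ [x]) else p) = t := by
          conv_rhs => rw [← List.map_id t]
          exact List.map_congr_left (fun q hq => by simp [ht' q hq])
        rw [hmapt]
        simp; ring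
      · have hpk : (p.1 == k) = false := by
          by_contra hbe
          have hpk' : p.1 = k := by
            cases hb : (p.1 == k) with
            | false => exact absurd hb hbe
            | true => exact eq_of_beq hb
          exact hnd.1 (hpk' ▸ List.mem_map_of_mem ht)
        rw [if_neg (by simp [hpk]), List.sum_cons, List.sum_cons, ih hnd.2 ht]
        ring

-- modifying key k adds (getD k []).sum + x to A's total
theorem pvResult_modify (d : PySem.Dict String (List Int)) (k : String) (x : Int)
    (hnd : d.keys.Nodup) :
    ((d.modify k [] (fun v => v ++ [x])).items.map (fun p => (pyAccumulate p.2).sum)).sum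
      = (d.items.map (fun p => (pyAccumulate p.2).sum)).sum + ((d.getD k []).sum + x) := by
  rw [PySem.Dict.modify, PySem.Dict.items_insert]
  by_cases hc : d.contains k = true
  · rw [if_pos hc]
    have hmem : (k, d.getD k []) ∈ d.items := by
      have hs : d.get? k = some (d.getD k []) := by
        rcases hg : d.get? k with _ | v
        · have := PySem.Dict.contains_eq_isSome_get? d k
          rw [hg, hc] at this
          exact absurd this (by simp)
        · rw [PySem.Dict.getD_of_get?_eq_some d [] hg]
      exact PySem.Dict.mem_items_of_get?_eq_some d hs
    rw [pvSum_map_replace k (d.getD k []) x d.items hnd hmem, pvAcc_append]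
    ring
  · rw [if_neg hc, PySem.Dict.getD_of_not_contains d [] (by simpa using hc)]
    simp [pyAccumulate, pyAccumulateGo]

theorem pvA_append (items : List String) (y : String) :
    sum_indices (items ++ [y])
      = sum_indices items + ((pvIdx items y).sum + (items.length : Int)) := by
  show ((pvDA (items ++ [y])).values.foldl _ 0) = _
  rw [pvResult_eq, pvDA_append, pvResult_modify _ _ _ (pvDA_nodup items), pvDA_getD _ y]
  rw [show sum_indices items = (pvDA items).values.foldl
        (fun indices v => indices + (pyAccumulate v).sum) 0 from rfl, pvResult_eq]

-- the combined invariant for B's single pass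
theorem pvB_invariant (items : List String) :
    (∀ k, (((PySem.List.enumerate items 0).foldl
        (fun st p =>
          let r := st.1.getD p.2 0 + p.1
          (st.1.insert p.2 r, st.2 + r))
        (PySem.Dict.empty, 0)).1.getD k 0 = (pvIdx items k).sum))
    ∧ ((PySem.List.enumerate items 0).foldl
        (fun st p =>
          let r := st.1.getD p.2 0 + p.1
          (st.1.insert p.2 r, st.2 + r))
        (PySem.Dict.empty, 0)).2 = sum_indices items := by
  induction items using List.reverseRecOn with
  | nil =>
      constructor
      · intro k; simp [PySem.List.enumerate_nil, pvIdx, PySem.Dict.getD_empty]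
      · simp [PySem.List.enumerate_nil, sum_indices, PySem.Dict.empty]
  | append_singleton xs y ih =>
      rw [pvEnumerate_append y xs 0]
      simp only [List.foldl_append, List.foldl_cons, List.foldl_nil]
      obtain ⟨ihrun, ihtot⟩ := ih
      constructor
      · intro k
        rw [PySem.Dict.getD_insert, pvIdx_append]
        by_cases h : k = y
        · subst h; simp [ihrun k]
        · have h2 : ¬ y = k := fun hyk => h hyk.symm
          simp [h, h2, ihrun k]
      · rw [pvA_append]
        simp [ihrun y, ihtot]

-- ===== VERDICT (by name: the statement is the Claim_ definition above) =====
theorem sum_indices_spec : Claim_equal_sum_indices := by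
  intro items _
  unfold Spec_sum_indices sum_indices_alt
  exact ((pvB_invariant items).2).symm
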